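-- pv_equiv track=rewrite | github.com/LeeJuhae/Algorithm_study | baekjoon/14501.py | can_work_days
-- ===== SOURCE A (Python) =====
-- def can_work_days(N, schedule):
-- 	work_days = dict()
-- 	for i in range(N):
-- 		if i + schedule[i][0] <= N:
-- 			work_days[i] = []
-- 			for j in range(i+schedule[i][0], N):
-- 				if j + schedule[j][0] <= N:
-- 					work_days[i].append(j)
-- 	return work_days
-- ===== SOURCE B (Python) =====
-- def _bisect_left(a, x):
--     lo, hi = 0, len(a)
--     while lo < hi:
--         mid = (lo + hi) // 2
--         if a[mid] < x:
--             lo = mid + 1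
--         else:
--             hi = mid
--     return lo
--
--
-- def can_work_days(N, schedule):
--     valid = [j for j in range(N) if j + schedule[j][0] <= N]
--     work_days = {}
--     for i in valid:
--         work_days[i] = valid[_bisect_left(valid, i + schedule[i][0]):]
--     return work_days
-- ===== Notes on version B (the rewrite author's own statement) =====
-- stated objective: alternative
-- what changed: B precomputes the sorted list of valid days once and, for each valid day i, obtains its compatible days as a suffix of that list found by binary search, instead of A's fresh inner scan over range(i+cost, N) that re-tests every day's validity for every i.
-- outside the precondition, e.g. on can_work_days(2, [(-1, 1), (1, 1)]): A returns {0: [-1, 0, 1], 1: []}, B returns {0: [0, 1], 1: []}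
import Mathlib
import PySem

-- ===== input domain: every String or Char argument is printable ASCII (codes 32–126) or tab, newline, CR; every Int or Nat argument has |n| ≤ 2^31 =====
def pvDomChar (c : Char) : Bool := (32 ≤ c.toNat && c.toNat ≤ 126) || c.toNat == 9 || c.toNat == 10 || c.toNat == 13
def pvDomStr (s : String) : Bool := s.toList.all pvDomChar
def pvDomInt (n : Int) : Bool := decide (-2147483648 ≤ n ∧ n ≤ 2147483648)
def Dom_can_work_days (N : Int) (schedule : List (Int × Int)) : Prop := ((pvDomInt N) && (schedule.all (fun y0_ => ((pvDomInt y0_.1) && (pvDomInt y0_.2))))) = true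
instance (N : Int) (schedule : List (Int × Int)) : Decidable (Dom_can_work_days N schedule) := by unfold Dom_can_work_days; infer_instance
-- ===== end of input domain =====

-- B replaces A's per-day rescans by one precomputed sorted list of valid days plus a
-- binary-search suffix per valid day (alternative decomposition, same exact dict).


-- ===== PORT A =====
-- 'for i in range(N)' / 'for j in range(t, N)' are ported as counting recursions with an
-- early exit 'none' exactly where Python's schedule[i] / schedule[j] raises IndexError
-- (PySem.List.pyGet? = none); on that error path can_work_days returns [] (outside Pre_).
def pvAInner (N : Int) (s : List (Int × Int)) (i j : Int)
    (wd : PySem.Dict Int (List Int)) : Option (PySem.Dict Int (List Int)) :=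
  if h : j < N then
    match PySem.List.pyGet? s j with
    | none => none  -- schedule[j] raises IndexError
    | some p =>
      pvAInner N s i (j + 1) (if j + p.1 ≤ N then wd.modify i [] (fun l => l ++ [j]) else wd)
  else some wd
termination_by (N - j).toNat
decreasing_by omega

def pvAOuter (N : Int) (s : List (Int × Int)) (i : Int)
    (wd : PySem.Dict Int (List Int)) : Option (PySem.Dict Int (List Int)) :=
  if h : i < N then
    match PySem.List.pyGet? s i with
    | none => none  -- schedule[i] raises IndexError
    | some p =>
      if i + p.1 ≤ N then
        match pvAInner N s i (i + p.1) (wd.insert i ([] : List Int)) with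
        | none => none
        | some wd' => pvAOuter N s (i + 1) wd'
      else pvAOuter N s (i + 1) wd
  else some wd
termination_by (N - i).toNat
decreasing_by all_goals omega

def can_work_days (N : Int) (schedule : List (Int × Int)) : List (Int × List Int) :=
  match pvAOuter N schedule 0 PySem.Dict.empty with
  | some wd => wd.items
  | none => []  -- Python A raises IndexError here (excluded by Pre_)

-- ===== PORT B =====
-- the list comprehension over range(N) is ported as the same counting recursion with an
-- early exit 'none' where schedule[j] raises IndexError; _bisect_left in Source B is
-- bisect_left's standard loop = PySem.List.bisectLeft; valid[pos:] with pos : Nat is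
-- List.drop pos (exact, pos ≥ 0).
def pvBValid (N : Int) (s : List (Int × Int)) (j : Int) : Option (List Int) :=
  if h : j < N then
    match PySem.List.pyGet? s j with
    | none => none  -- schedule[j] raises IndexError
    | some p =>
      match pvBValid N s (j + 1) with
      | none => none
      | some rest => some (if j + p.1 ≤ N then j :: rest else rest)
  else some []
termination_by (N - j).toNat
decreasing_by omega

def can_work_days_alt (N : Int) (schedule : List (Int × Int)) : List (Int × List Int) :=
  match pvBValid N schedule 0 with
  | none => []  -- Python B raises IndexError here (excluded by Pre_)
  | some valid =>
    ((valid.foldl (fun wd i =>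
        wd.insert i (valid.drop
          (PySem.List.bisectLeft valid (i + (PySem.List.pyGetD schedule i (0, 0)).1))))
      (PySem.Dict.empty))).items

-- ===== PRECONDITION & SPEC =====
-- Pre_ restricts to the problem's natural domain: N ≤ len(schedule) (A raises IndexError
-- otherwise) and nonnegative durations for the first N days — a negative duration makes A
-- scan negative j with Python wraparound indexing (or raise), outside the natural domain.
def Pre_can_work_days (N : Int) (schedule : List (Int × Int)) : Prop :=
  N ≤ schedule.length ∧ ∀ p ∈ schedule.take N.toNat, 0 ≤ p.1
instance (N : Int) (schedule : List (Int × Int)) : Decidable (Pre_can_work_days N schedule) := by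
  unfold Pre_can_work_days; infer_instance
def pvWitness_can_work_days : Int × (List (Int × Int)) := (3, [(3, 10), (5, 20), (1, 10)])

def Spec_can_work_days (N : Int) (schedule : List (Int × Int)) (out : List (Int × List Int)) : Prop := out = can_work_days_alt N schedule
instance (N : Int) (schedule : List (Int × Int)) (out : List (Int × List Int)) : Decidable (Spec_can_work_days N schedule out) := by unfold Spec_can_work_days; infer_instance

-- ===== CLAIM (what is proved, stated in full; the proofs are below) =====
def Claim_equal_can_work_days : Prop := ∀ (N : Int) (schedule : List (Int × Int)), Dom_can_work_days N schedule → Pre_can_work_days N schedule → Spec_can_work_days N schedule (can_work_days N schedule)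

-- ===== LEMMAS AND PROOFS =====

-- abbreviations used only by the proofs
def pvC (s : List (Int × Int)) (j : Int) : Int := (PySem.List.pyGetD s j (0, 0)).1
def pvP (N : Int) (s : List (Int × Int)) (j : Int) : Bool := decide (j + pvC s j ≤ N)
def pvV (N : Int) (s : List (Int × Int)) : List Int := (PySem.List.pyRange 0 N).filter (pvP N s)

-- range(t, N) is the suffix of range(0, N) from t, for 0 ≤ t
theorem pv_range_as_filter (N t : Int) (ht : 0 ≤ t) :
    PySem.List.pyRange t N = (PySem.List.pyRange 0 N).filter (fun j => decide (t ≤ j)) := by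
  by_cases h : t ≤ N
  · rw [PySem.List.pyRange_one_append 0 t N ht h, List.filter_append]
    have h1 : (PySem.List.pyRange 0 t).filter (fun j => decide (t ≤ j)) = [] := by
      rw [List.filter_eq_nil_iff]
      intro x hx
      have := PySem.List.mem_pyRange_one.mp hx
      simp; omega
    have h2 : (PySem.List.pyRange t N).filter (fun j => decide (t ≤ j)) = PySem.List.pyRange t N := by
      rw [List.filter_eq_self]
      intro x hx
      have := PySem.List.mem_pyRange_one.mp hx
      simp; omega
    rw [h1, h2, List.nil_append]
  · rw [PySem.List.pyRange_one_eq_nil (by omega)]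
    symm; rw [List.filter_eq_nil_iff]
    intro x hx
    have := PySem.List.mem_pyRange_one.mp hx
    simp; omega

-- filter of the inner range equals the ≥ t part of the valid list
theorem pv_inner_eq (N t : Int) (s : List (Int × Int)) (ht : 0 ≤ t) :
    (PySem.List.pyRange t N).filter (pvP N s) = (pvV N s).filter (fun j => decide (t ≤ j)) := by
  rw [pv_range_as_filter N t ht, List.filter_comm]; rfl

-- sorted list: the suffix from bisectLeft is the filter (t ≤ ·)
theorem pv_bisect_drop (V : List Int) (t : Int) (hs : V.Pairwise (· ≤ ·)) :
    V.drop (PySem.List.bisectLeft V t) = V.filter (fun j => decide (t ≤ j)) := by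
  obtain ⟨hlen, hlt, hge⟩ := PySem.List.bisectLeft_spec V t hs
  set pos := PySem.List.bisectLeft V t with hpos
  conv_rhs => rw [← List.take_append_drop pos V]
  rw [List.filter_append]
  have h1 : (V.take pos).filter (fun j => decide (t ≤ j)) = [] := by
    rw [List.filter_eq_nil_iff]
    intro x hx
    obtain ⟨j, hj, hx⟩ := List.mem_iff_getElem.mp hx
    have hj' : j < pos := by simp at hj; omega
    have := hlt j (by omega) hj'
    rw [List.getElem_take] at hx
    simp; omega
  have h2 : (V.drop pos).filter (fun j => decide (t ≤ j)) = V.drop pos := by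
    rw [List.filter_eq_self]
    intro x hx
    obtain ⟨j, hj, hx⟩ := List.mem_iff_getElem.mp hx
    rw [List.getElem_drop] at hx
    have := hge (pos + j) (by simp at hj; omega) (by omega)
    simp; omega
  rw [h1, h2, List.nil_append]

theorem pv_inner_getD_self (N : Int) (s : List (Int × Int)) (i : Int) (l : List Int)
    (d : PySem.Dict Int (List Int)) :
    ((l.foldl (fun d j => if j + pvC s j ≤ N then PySem.Dict.modify d i [] (fun v => v ++ [j]) else d) d)).getD i [] =
      d.getD i [] ++ l.filter (pvP N s) := by
  induction l generalizing d with
  | nil => simp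
  | cons a l ih =>
    rw [List.foldl_cons]
    by_cases hp : a + pvC s a ≤ N
    · rw [if_pos hp, ih, PySem.Dict.getD_modify_self,
        List.filter_cons_of_pos (by simp [pvP, hp])]
      simp
    · rw [if_neg hp, ih, List.filter_cons_of_neg (by simp [pvP, hp])]

theorem pv_inner_getD_ne (N : Int) (s : List (Int × Int)) (i k : Int) (hk : k ≠ i) (l : List Int)
    (d : PySem.Dict Int (List Int)) :
    ((l.foldl (fun d j => if j + pvC s j ≤ N then PySem.Dict.modify d i [] (fun v => v ++ [j]) else d) d)).getD k [] =
      d.getD k [] := by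
  induction l generalizing d with
  | nil => rfl
  | cons a l ih =>
    rw [List.foldl_cons]
    by_cases hp : a + pvC s a ≤ N
    · rw [if_pos hp, ih, PySem.Dict.getD_modify_of_ne _ _ _ hk]
    · rw [if_neg hp, ih]

theorem pv_inner_keys (N : Int) (s : List (Int × Int)) (i : Int) (l : List Int)
    (d : PySem.Dict Int (List Int)) (hi : i ∈ d.keys) :
    ((l.foldl (fun d j => if j + pvC s j ≤ N then PySem.Dict.modify d i [] (fun v => v ++ [j]) else d) d)).keys =
      d.keys := by
  induction l generalizing d with
  | nil => rfl
  | cons a l ih =>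
    rw [List.foldl_cons]
    by_cases hp : a + pvC s a ≤ N
    · have hc : d.contains i = true := (PySem.Dict.contains_iff_mem_keys ..).mpr hi
      have hk : (PySem.Dict.modify d i [] (fun v => v ++ [a])).keys = d.keys := by
        rw [PySem.Dict.keys_modify, PySem.Dict.keys_insert_of_contains _ _ hc]
      rw [if_pos hp, ih _ (by rw [hk]; exact hi), hk]
    · rw [if_neg hp, ih _ hi]

theorem pv_outer (N : Int) (s : List (Int × Int)) :
    ∀ (L : List Int) (d : PySem.Dict Int (List Int)), d.keys.Nodup → L.Nodup →
      (∀ x ∈ L, x ∉ d.keys) →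
      ((L.foldl (fun wd i =>
          if i + pvC s i ≤ N then
            ((PySem.List.pyRange (i + pvC s i) N).foldl
              (fun wd j => if j + pvC s j ≤ N then wd.modify i [] (fun l => l ++ [j]) else wd)
              (wd.insert i ([] : List Int)))
          else wd) d)).items =
        d.items ++ (L.filter (pvP N s)).map
          (fun i => (i, (PySem.List.pyRange (i + pvC s i) N).filter (pvP N s))) := by
  intro L
  induction L with
  | nil => intro d _ _ _; simp
  | cons a L ih =>
    intro d hnd hLnd hfresh
    have haL : a ∉ L := (List.nodup_cons.mp hLnd).1
    have hLnd' : L.Nodup := (List.nodup_cons.mp hLnd).2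
    have haK : a ∉ d.keys := hfresh a (List.mem_cons_self ..)
    have hca : d.contains a = false := by
      rw [PySem.Dict.contains_eq_decide_mem_keys]; simp [haK]
    by_cases hp : a + pvC s a ≤ N
    · rw [List.foldl_cons, if_pos hp]
      have hkeys1 : (d.insert a ([] : List Int)).keys = d.keys ++ [a] :=
        PySem.Dict.keys_insert_of_not_contains d _ hca
      have hnd1 : (d.keys ++ [a]).Nodup := by
        simp [List.nodup_append, hnd]
        intro x hx h
        exact haK (h ▸ hx)
      set js := PySem.List.pyRange (a + pvC s a) N with hjs
      set d2 := js.foldl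
        (fun wd j => if j + pvC s j ≤ N then PySem.Dict.modify wd a [] (fun l => l ++ [j]) else wd)
        (d.insert a ([] : List Int)) with hd2
      have hk2 : d2.keys = d.keys ++ [a] := by
        rw [hd2, pv_inner_keys N s a js _ (by rw [hkeys1]; simp), hkeys1]
      have hnd2 : d2.keys.Nodup := by rw [hk2]; exact hnd1
      have hga : d2.getD a [] = js.filter (pvP N s) := by
        rw [hd2, pv_inner_getD_self, PySem.Dict.getD_insert_self, List.nil_append]
      have hgk : ∀ k ∈ d.keys, d2.getD k [] = d.getD k [] := by
        intro k hk
        have hka : k ≠ a := fun h => haK (h ▸ hk)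
        rw [hd2, pv_inner_getD_ne N s a k hka, PySem.Dict.getD_insert_of_ne _ _ _ hka]
      have hitems2 : d2.items = d.items ++ [(a, js.filter (pvP N s))] := by
        rw [PySem.Dict.items_eq_map_keys d2 hnd2 [], hk2, List.map_append,
            PySem.Dict.items_eq_map_keys d hnd []]
        congr 1
        · exact List.map_congr_left (fun k hk => by rw [hgk k hk])
        · simp [hga]
      have hfresh2 : ∀ x ∈ L, x ∉ d2.keys := by
        intro x hx
        rw [hk2]
        simp only [List.mem_append, List.mem_singleton]
        rintro (h | h)
        · exact hfresh x (List.mem_cons_of_mem _ hx) h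
        · exact haL (h ▸ hx)
      rw [ih d2 hnd2 hLnd' hfresh2, hitems2]
      rw [List.filter_cons_of_pos (by simp [pvP, hp]), List.map_cons, List.append_assoc]
      rfl
    · rw [List.foldl_cons, if_neg hp]
      rw [ih d hnd hLnd' (fun x hx => hfresh x (List.mem_cons_of_mem _ hx)),
          List.filter_cons_of_neg (by simp [pvP, hp])]

theorem pv_sorted_V (N : Int) (s : List (Int × Int)) : (pvV N s).Pairwise (· ≤ ·) :=
  ((PySem.List.pairwise_lt_pyRange_one 0 N).filter _).imp le_of_lt

theorem pv_nodup_V (N : Int) (s : List (Int × Int)) : (pvV N s).Nodup :=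
  (PySem.List.nodup_pyRange_one 0 N).filter _

theorem pv_t_nonneg (N : Int) (s : List (Int × Int)) (h : Pre_can_work_days N s)
    (i : Int) (hi : i ∈ pvV N s) : 0 ≤ i + pvC s i := by
  obtain ⟨hN, hall⟩ := h
  have hmem := List.mem_filter.mp hi |>.1
  have hr := PySem.List.mem_pyRange_one.mp hmem
  have hiN : i.toNat < s.length := by omega
  have hC : pvC s i = (s[i.toNat]).1 := by
    unfold pvC
    rw [PySem.List.pyGetD_of_nonneg s (0,0) hr.1, List.getD_eq_getElem s (0,0) hiN]
  have hmt : s[i.toNat] ∈ s.take N.toNat := by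
    have h2 : i.toNat < (s.take N.toNat).length := by simp; omega
    have := List.getElem_take (xs := s) (i := i.toNat) (j := N.toNat) (h := h2)
    rw [← this]
    exact List.getElem_mem h2
  have := hall _ hmt
  omega


theorem pv_c_nonneg (N : Int) (s : List (Int × Int)) (h : Pre_can_work_days N s)
    (j : Int) (h0 : 0 ≤ j) (hj : j < N) : 0 ≤ pvC s j := by
  obtain ⟨hN, hall⟩ := h
  have hjN : j.toNat < s.length := by omega
  have hC : pvC s j = (s[j.toNat]).1 := by
    unfold pvC
    rw [PySem.List.pyGetD_of_nonneg s (0,0) h0, List.getD_eq_getElem s (0,0) hjN]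
  have hmt : s[j.toNat] ∈ s.take N.toNat := by
    have h2 : j.toNat < (s.take N.toNat).length := by simp; omega
    have := List.getElem_take (xs := s) (i := j.toNat) (j := N.toNat) (h := h2)
    rw [← this]
    exact List.getElem_mem h2
  have := hall _ hmt
  omega

theorem pv_get_some (N : Int) (s : List (Int × Int)) (h : Pre_can_work_days N s)
    (j : Int) (h0 : 0 ≤ j) (hj : j < N) :
    PySem.List.pyGet? s j = some (s.getD j.toNat (0, 0)) := by
  have hjN : j.toNat < s.length := by
    have := h.1; omega
  have hcast : j = ((j.toNat : Nat) : Int) := by omega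
  conv_lhs => rw [hcast]
  rw [PySem.List.pyGet?_natCast, List.getElem?_eq_getElem hjN,
      List.getD_eq_getElem s (0,0) hjN]

theorem pv_get_fst (N : Int) (s : List (Int × Int)) (h : Pre_can_work_days N s)
    (j : Int) (h0 : 0 ≤ j) (hj : j < N) :
    (s.getD j.toNat (0, 0)).1 = pvC s j := by
  unfold pvC PySem.List.pyGetD
  rw [pv_get_some N s h j h0 hj]
  rfl

theorem pv_AInner_bridge (N : Int) (s : List (Int × Int)) (h : Pre_can_work_days N s)
    (i : Int) (t : Int) (ht : 0 ≤ t) (wd : PySem.Dict Int (List Int)) :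
    pvAInner N s i t wd = some ((PySem.List.pyRange t N).foldl
      (fun wd j => if j + pvC s j ≤ N then wd.modify i [] (fun l => l ++ [j]) else wd) wd) := by
  by_cases hlt : t < N
  case neg =>
    rw [pvAInner, dif_neg hlt, PySem.List.pyRange_one_eq_nil (by omega)]
    rfl
  case pos =>
    have hfuel : (N - t).toNat ≠ 0 := by omega
    rw [pvAInner, dif_pos hlt, pv_get_some N s h t ht hlt]
    simp only
    rw [pv_AInner_bridge N s h i (t + 1) (by omega),
        PySem.List.pyRange_one_cons hlt, List.foldl_cons, pv_get_fst N s h t ht hlt]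
termination_by (N - t).toNat
decreasing_by omega

theorem pv_AOuter_bridge (N : Int) (s : List (Int × Int)) (h : Pre_can_work_days N s)
    (i : Int) (hi : 0 ≤ i) (wd : PySem.Dict Int (List Int)) :
    pvAOuter N s i wd = some ((PySem.List.pyRange i N).foldl
      (fun wd i =>
        if i + pvC s i ≤ N then
          ((PySem.List.pyRange (i + pvC s i) N).foldl
            (fun wd j => if j + pvC s j ≤ N then wd.modify i [] (fun l => l ++ [j]) else wd)
            (wd.insert i ([] : List Int)))
        else wd) wd) := by
  by_cases hlt : i < N
  case neg =>
    rw [pvAOuter, dif_neg hlt, PySem.List.pyRange_one_eq_nil (by omega)]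
    rfl
  case pos =>
    rw [pvAOuter, dif_pos hlt, pv_get_some N s h i hi hlt]
    simp only
    rw [PySem.List.pyRange_one_cons hlt, List.foldl_cons]
    by_cases hp : i + (s.getD i.toNat (0, 0)).1 ≤ N
    · rw [if_pos hp, pv_AInner_bridge N s h i (i + (s.getD i.toNat (0, 0)).1)
            (by have := pv_c_nonneg N s h i hi hlt; rw [pv_get_fst N s h i hi hlt]; omega) _]
      simp only
      rw [pv_AOuter_bridge N s h (i + 1) (by omega)]
      rw [pv_get_fst N s h i hi hlt] at hp ⊢
      rw [if_pos hp]
    · rw [if_neg hp, pv_AOuter_bridge N s h (i + 1) (by omega)]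
      rw [pv_get_fst N s h i hi hlt] at hp
      rw [if_neg hp]
termination_by (N - i).toNat
decreasing_by all_goals omega

theorem pv_BValid_bridge (N : Int) (s : List (Int × Int)) (h : Pre_can_work_days N s)
    (j : Int) (hj : 0 ≤ j) :
    pvBValid N s j = some ((PySem.List.pyRange j N).filter (pvP N s)) := by
  by_cases hlt : j < N
  case neg =>
    rw [pvBValid, dif_neg hlt, PySem.List.pyRange_one_eq_nil (by omega)]
    rfl
  case pos =>
    rw [pvBValid, dif_pos hlt, pv_get_some N s h j hj hlt,
        pv_BValid_bridge N s h (j + 1) (by omega)]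
    show some (if j + (s.getD j.toNat (0, 0)).1 ≤ N
        then j :: List.filter (pvP N s) (PySem.List.pyRange (j + 1) N)
        else List.filter (pvP N s) (PySem.List.pyRange (j + 1) N)) = _
    rw [PySem.List.pyRange_one_cons hlt]
    by_cases hp : j + (s.getD j.toNat (0, 0)).1 ≤ N
    · have hp' : j + pvC s j ≤ N := by rwa [pv_get_fst N s h j hj hlt] at hp
      rw [List.filter_cons_of_pos (by simp [pvP, hp']), if_pos hp]
    · have hp' : ¬ j + pvC s j ≤ N := by rwa [pv_get_fst N s h j hj hlt] at hp
      rw [List.filter_cons_of_neg (by simp [pvP, hp']), if_neg hp]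
termination_by (N - j).toNat
decreasing_by omega

-- ===== VERDICT (by name: the statement is the Claim_ definition above) =====
theorem can_work_days_spec : Claim_equal_can_work_days := by
  intro N s _hdom hpre
  unfold Spec_can_work_days can_work_days can_work_days_alt
  rw [pv_AOuter_bridge N s hpre 0 le_rfl, pv_BValid_bridge N s hpre 0 le_rfl]
  show (((PySem.List.pyRange 0 N).foldl (fun wd i =>
          if i + pvC s i ≤ N then
            ((PySem.List.pyRange (i + pvC s i) N).foldl
              (fun wd j => if j + pvC s j ≤ N then wd.modify i [] (fun l => l ++ [j]) else wd)
              (wd.insert i ([] : List Int)))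
          else wd) PySem.Dict.empty)).items
      = (((pvV N s).foldl (fun wd i =>
          wd.insert i ((pvV N s).drop (PySem.List.bisectLeft (pvV N s) (i + pvC s i))))
          PySem.Dict.empty)).items
  have hmap : ((PySem.List.pyRange 0 N).filter (pvP N s)).map
        (fun i => (i, (PySem.List.pyRange (i + pvC s i) N).filter (pvP N s))) =
      (pvV N s).map
        (fun a => ((fun i => i) a,
          (pvV N s).drop (PySem.List.bisectLeft (pvV N s) (a + pvC s a)))) := by
    apply List.map_congr_left
    intro i hi
    have ht := pv_t_nonneg N s hpre i hi
    exact congrArg (fun z => (i, z))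
      ((pv_inner_eq N (i + pvC s i) s ht).trans (pv_bisect_drop _ _ (pv_sorted_V N s)).symm)
  rw [pv_outer N s (PySem.List.pyRange 0 N) PySem.Dict.empty
        (by simp [PySem.Dict.keys_empty]) (PySem.List.nodup_pyRange_one 0 N)
        (by simp [PySem.Dict.keys_empty]),
      PySem.Dict.items_foldl_insert_fresh (pvV N s) (fun i => i)
        (fun i => (pvV N s).drop (PySem.List.bisectLeft (pvV N s) (i + pvC s i)))
        PySem.Dict.empty (by intro a _; simp [PySem.Dict.contains_empty])
        (by simpa using pv_nodup_V N s)]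
  have he : (PySem.Dict.empty : PySem.Dict Int (List Int)).items = [] := rfl
  rw [he, List.nil_append, List.nil_append]
  exact hmap
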